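-- pv_equiv track=rewrite | github.com/sunkyuj/bj | 9527_2.py | sum_f
-- ===== SOURCE A (Python) =====
-- import math
--
-- def sum_f(x):
--     if x <= 0:
--         return 0
--
--     seung = int(math.log2(x))  # 2**seung <= x <= 2**(seung+1)
--     floor_2pow = 2 ** seung  # <= x 인 2의 ?승
--     if floor_2pow == x:
--         return seung * x // 2 + 1
--
--     diff = x - floor_2pow
--     return sum_f(floor_2pow) + diff + sum_f(diff)
-- ===== SOURCE B (Python) =====
-- import math
--
-- def sum_f(x):
--     total = 0
--     while x > 0:
--         seung = int(math.log2(x))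
--         floor_2pow = 2 ** seung
--         if floor_2pow == x:
--             total += seung * x // 2 + 1
--             break
--         diff = x - floor_2pow
--         total += seung * floor_2pow // 2 + 1 + diff
--         x = diff
--     return total
-- ===== Notes on version B (the rewrite author's own statement) =====
-- stated objective: simpler
-- what changed: Replaced A's two-branch recursion (sum_f(floor_2pow) + diff + sum_f(diff)) by a single iterative accumulator loop that inlines the always-base-case sum_f(floor_2pow) as its closed form seung*floor_2pow//2+1 and turns the tail recursion on diff into a while loop.
import Mathlib
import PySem

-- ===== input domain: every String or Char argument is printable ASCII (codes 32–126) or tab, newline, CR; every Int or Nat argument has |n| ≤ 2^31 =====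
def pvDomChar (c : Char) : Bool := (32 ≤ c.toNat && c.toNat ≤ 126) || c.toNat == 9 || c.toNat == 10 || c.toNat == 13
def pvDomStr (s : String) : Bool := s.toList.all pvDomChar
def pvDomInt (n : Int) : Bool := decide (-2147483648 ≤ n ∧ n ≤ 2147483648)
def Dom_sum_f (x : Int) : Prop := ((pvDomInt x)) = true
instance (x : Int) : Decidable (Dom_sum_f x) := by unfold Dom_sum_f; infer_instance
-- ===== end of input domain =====

-- B replaces A's binary recursion by an iterative accumulator loop: the always-base-case
-- sum_f(floor_2pow) is inlined as its closed form and the tail recursion on diff becomes a loop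
-- (objective: simpler, no speed claim).
-- int(math.log2(x)) is ported as Nat.log 2 x.toNat: exact for 1 ≤ x ≤ 2^31 (float log2 rounds to
-- the true floor there), and both ports use it identically.

-- ===== PORT A =====
def sum_f (x : Int) : Int :=
  if hx : x ≤ 0 then 0
  else
    let seung : Nat := Nat.log 2 x.toNat
    let floor_2pow : Int := ((2 ^ seung : Nat) : Int)
    if _he : floor_2pow = x then PySem.Int.floordiv ((seung : Int) * x) 2 + 1
    else
      sum_f floor_2pow + (x - floor_2pow) + sum_f (x - floor_2pow)
termination_by x.toNat
decreasing_by
  · have hx' : 0 < x := by omega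
    have h1 : 2 ^ Nat.log 2 x.toNat ≤ x.toNat := Nat.pow_log_le_self 2 (by omega)
    have h2 : ((2 ^ Nat.log 2 x.toNat : Nat) : Int) ≠ x := _he
    have h3 : (2 ^ Nat.log 2 x.toNat : Nat) ≠ x.toNat := by
      intro he; exact h2 (by rw [he]; omega)
    simp only [Int.toNat_natCast]
    omega
  · have hx' : 0 < x := by omega
    have h0 : 1 ≤ (2 ^ Nat.log 2 x.toNat : Nat) := Nat.one_le_two_pow
    have h1 : 2 ^ Nat.log 2 x.toNat ≤ x.toNat := Nat.pow_log_le_self 2 (by omega)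
    omega

-- ===== PORT B =====
-- the while-loop of Source B: x and the running total are the loop state
def sumFLoop (x : Int) (total : Int) : Int :=
  if hx : x ≤ 0 then total
  else
    let seung : Nat := Nat.log 2 x.toNat
    let floor_2pow : Int := ((2 ^ seung : Nat) : Int)
    if _he : floor_2pow = x then total + (PySem.Int.floordiv ((seung : Int) * x) 2 + 1)
    else
      sumFLoop (x - floor_2pow)
        (total + (PySem.Int.floordiv ((seung : Int) * floor_2pow) 2 + 1 + (x - floor_2pow)))
termination_by x.toNat
decreasing_by
  have hx' : 0 < x := by omega
  have h0 : 1 ≤ (2 ^ Nat.log 2 x.toNat : Nat) := Nat.one_le_two_pow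
  have h1 : 2 ^ Nat.log 2 x.toNat ≤ x.toNat := Nat.pow_log_le_self 2 (by omega)
  omega

def sum_f_alt (x : Int) : Int := sumFLoop x 0

-- ===== PRECONDITION & SPEC =====
def Spec_sum_f (x : Int) (out : Int) : Prop := out = sum_f_alt x
instance (x : Int) (out : Int) : Decidable (Spec_sum_f x out) := by unfold Spec_sum_f; infer_instance

-- ===== CLAIM (what is proved, stated in full; the proofs are below) =====
def Claim_equal_sum_f : Prop := ∀ (x : Int), Dom_sum_f x → Spec_sum_f x (sum_f x)

-- ===== LEMMAS AND PROOFS =====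

-- A on an exact power of two always takes the base case
lemma sum_f_pow (s : Nat) :
    sum_f ((2 ^ s : Nat) : Int) = PySem.Int.floordiv ((s : Int) * ((2 ^ s : Nat) : Int)) 2 + 1 := by
  rw [sum_f]
  have h0 : ¬ (((2 ^ s : Nat) : Int) ≤ 0) := by
    have : 1 ≤ (2 ^ s : Nat) := Nat.one_le_two_pow
    omega
  rw [dif_neg h0]
  simp only [Int.toNat_natCast, Nat.log_pow (by norm_num : 1 < 2)]
  simp

-- loop invariant: the loop adds sum_f x to the accumulator
lemma sumFLoop_eq : ∀ (n : Nat) (x : Int), x.toNat ≤ n → ∀ (total : Int),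
    sumFLoop x total = total + sum_f x := by
  intro n
  induction n with
  | zero =>
    intro x hx total
    have hle : x ≤ 0 := by omega
    rw [sumFLoop, sum_f]
    simp [hle]
  | succ n ih =>
    intro x hx total
    by_cases hle : x ≤ 0
    · rw [sumFLoop, sum_f]; simp [hle]
    · rw [sumFLoop, sum_f]
      simp only [hle, dite_false]
      by_cases he : ((2 ^ Nat.log 2 x.toNat : Nat) : Int) = x
      · simp [he]
      · simp only [he, dite_false]
        have hx' : 0 < x := by omega
        have h0 : 1 ≤ (2 ^ Nat.log 2 x.toNat : Nat) := Nat.one_le_two_pow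
        have hsmall : (x - ((2 ^ Nat.log 2 x.toNat : Nat) : Int)).toNat ≤ n := by omega
        rw [ih _ hsmall, sum_f_pow]
        ring

-- ===== VERDICT (by name: the statement is the Claim_ definition above) =====
theorem sum_f_spec : Claim_equal_sum_f := by
  intro x _
  unfold Spec_sum_f sum_f_alt
  rw [sumFLoop_eq x.toNat x le_rfl 0, zero_add]
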